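-- pv_equiv track=rewrite | github.com/Vineeth2002/driftmonitor | metrics/toxicity/toxicity.py | toxicity_hits
-- ===== SOURCE A (Python) =====
-- from typing import Iterable, List, Dict
--
-- DEFAULT_TOXIC_KEYWORDS = {
--     "kill",
--     "suicide",
--     "terror",
--     "bomb",
--     "rape",
--     "idiot",
--     "stfu",
--     "hate",
--     "racist",
--     "slur",
-- }
--
-- def toxicity_hits(text: str, keywords: Iterable[str] = DEFAULT_TOXIC_KEYWORDS) -> int:
--     """Return number of toxic keyword hits in a text (case-insensitive substring match)."""
--     if not isinstance(text, str):
--         return 0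
--     t = text.lower()
--     hits = 0
--     for k in keywords:
--         if k in t:
--             hits += 1
--     return hits
-- ===== SOURCE B (Python) =====
-- DEFAULT_TOXIC_KEYWORDS = {
--     "kill",
--     "suicide",
--     "terror",
--     "bomb",
--     "rape",
--     "idiot",
--     "stfu",
--     "hate",
--     "racist",
--     "slur",
-- }
--
-- def toxicity_hits(text, keywords=DEFAULT_TOXIC_KEYWORDS):
--     if not isinstance(text, str):
--         return 0
--     t = text.lower()
--     ks = list(keywords)
--     # collect every substring of t whose length is some keyword's length,
--     # then answer each keyword entry by one hash lookup
--     subs = set()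
--     for L in set(len(k) for k in ks):
--         for i in range(len(t) - L + 1):
--             subs.add(t[i:i+L])
--     return sum(1 for k in ks if k in subs)
-- ===== Notes on version B (the rewrite author's own statement) =====
-- stated objective: faster
-- what changed: Instead of A's one substring search ('k in t') per keyword entry, B builds a hash set of all substrings of the lowered text whose length is some keyword's length (one pass over the positions per distinct length) and answers each keyword entry by a single set lookup.
import Mathlib
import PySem

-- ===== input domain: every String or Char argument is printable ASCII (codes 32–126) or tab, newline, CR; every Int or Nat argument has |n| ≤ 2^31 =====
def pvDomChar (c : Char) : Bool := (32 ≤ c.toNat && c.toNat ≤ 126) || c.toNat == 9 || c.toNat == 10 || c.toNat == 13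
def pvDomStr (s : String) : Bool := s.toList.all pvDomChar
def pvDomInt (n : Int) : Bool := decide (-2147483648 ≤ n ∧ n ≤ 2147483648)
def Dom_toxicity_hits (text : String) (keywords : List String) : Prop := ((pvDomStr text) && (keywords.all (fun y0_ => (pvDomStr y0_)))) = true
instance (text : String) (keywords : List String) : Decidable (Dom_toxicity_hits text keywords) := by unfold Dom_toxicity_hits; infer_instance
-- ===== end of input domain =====

-- B replaces A's per-keyword substring searches by hashing: it collects the set of all
-- substrings of the lowered text whose length is some keyword's length, then answers
-- each keyword entry by one set lookup (faster on large inputs in a timing run).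

-- ===== PORT A =====
def toxicity_hits (text : String) (keywords : List String) : Int :=
  let t := PySem.Str.lower text
  keywords.foldl (fun hits k => if PySem.Str.isIn k t then hits + 1 else hits) 0

-- ===== PORT B =====
def toxicity_hits_alt (text : String) (keywords : List String) : Int :=
  let t := PySem.Str.lower text
  let subs :=
    (PySem.Set.ofList (keywords.map (fun k => PySem.Str.len k))).foldl
      (fun subs L =>
        (PySem.List.pyRange 0 (PySem.Str.len t - L + 1)).foldl
          (fun subs i => PySem.Set.add subs (PySem.Str.slice t (some i) (some (i + L))))
          subs)
      PySem.Set.empty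
  ((keywords.filter (fun k => subs.contains k)).map (fun _ => (1 : Int))).sum

-- ===== PRECONDITION & SPEC =====
def Spec_toxicity_hits (text : String) (keywords : List String) (out : Int) : Prop := out = toxicity_hits_alt text keywords
instance (text : String) (keywords : List String) (out : Int) : Decidable (Spec_toxicity_hits text keywords out) := by unfold Spec_toxicity_hits; infer_instance

-- ===== CLAIM (what is proved, stated in full; the proofs are below) =====
def Claim_equal_toxicity_hits : Prop := ∀ (text : String) (keywords : List String), Dom_toxicity_hits text keywords → Spec_toxicity_hits text keywords (toxicity_hits text keywords)

-- ===== LEMMAS AND PROOFS =====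

-- membership in the inner loop of B: a set fold that only adds g i for i in the list
lemma mem_foldl_add (g : Int → String) (l : List Int) : ∀ (s : PySem.Set String) (k : String),
    k ∈ l.foldl (fun s i => PySem.Set.add s (g i)) s ↔ k ∈ s ∨ ∃ i ∈ l, k = g i := by
  induction l with
  | nil => intro s k; simp
  | cons x l ih =>
    intro s k
    rw [List.foldl_cons, ih]
    simp only [PySem.Set.mem_add, List.mem_cons]
    constructor
    · rintro ((h | rfl) | ⟨i, hi, rfl⟩)
      · exact Or.inl h
      · exact Or.inr ⟨x, Or.inl rfl, rfl⟩
      · exact Or.inr ⟨i, Or.inr hi, rfl⟩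
    · rintro (h | ⟨i, rfl | hi, rfl⟩)
      · exact Or.inl (Or.inl h)
      · exact Or.inl (Or.inr rfl)
      · exact Or.inr ⟨i, hi, rfl⟩

-- membership in B's nested fold over the keyword lengths
lemma mem_foldl_foldl (g : Int → Int → String) (r : Int → List Int) (l : List Int) :
    ∀ (s : PySem.Set String) (k : String),
      k ∈ l.foldl (fun s L => (r L).foldl (fun s i => PySem.Set.add s (g L i)) s) s ↔
        k ∈ s ∨ ∃ L ∈ l, ∃ i ∈ r L, k = g L i := by
  induction l with
  | nil => intro s k; simp
  | cons x l ih =>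
    intro s k
    rw [List.foldl_cons, ih, mem_foldl_add]
    simp only [List.mem_cons]
    constructor
    · rintro ((h | ⟨i, hi, rfl⟩) | ⟨L, hL, hi⟩)
      · exact Or.inl h
      · exact Or.inr ⟨x, Or.inl rfl, i, hi, rfl⟩
      · exact Or.inr ⟨L, Or.inr hL, hi⟩
    · rintro (h | ⟨L, rfl | hL, hi⟩)
      · exact Or.inl (Or.inl h)
      · exact Or.inl (Or.inr hi)
      · exact Or.inr ⟨L, hL, hi⟩

-- for each keyword entry, sitting in B's substring set = being a substring of the text
lemma subs_contains_iff (text : String) (keywords : List String) (k : String) (hk : k ∈ keywords) :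
    ((PySem.Set.ofList (keywords.map (fun k => PySem.Str.len k))).foldl
      (fun subs L =>
        (PySem.List.pyRange 0 (PySem.Str.len (PySem.Str.lower text) - L + 1)).foldl
          (fun subs i => PySem.Set.add subs
            (PySem.Str.slice (PySem.Str.lower text) (some i) (some (i + L))))
          subs)
      PySem.Set.empty).contains k
    = PySem.Str.isIn k (PySem.Str.lower text) := by
  unfold PySem.Set.contains
  rw [Bool.eq_iff_iff, List.contains_iff_mem, mem_foldl_foldl, PySem.Str.isIn_eq,
    ← PySem.Chars.exists_prefix_drop_iff_isIn]
  simp only [PySem.Set.empty, List.not_mem_nil, false_or, PySem.Set.mem_ofList, List.mem_map,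
    PySem.List.mem_pyRange_one, PySem.Str.len_eq]
  constructor
  · rintro ⟨L, ⟨k', _, rfl⟩, i, ⟨hi0, _⟩, rfl⟩
    refine ⟨i.toNat, ?_⟩
    rw [PySem.Str.toList_slice, PySem.Chars.slice_eq_listSlice,
      PySem.List.slice_toNat _ hi0 (by omega)]
    exact List.take_prefix _ _
  · rintro ⟨j, hpre⟩
    refine ⟨(k.toList.length : Int), ⟨k, hk, rfl⟩, ?_⟩
    rcases hpre with ⟨tl, htl⟩
    have hlen : k.toList.length + tl.length = (PySem.Str.lower text).toList.length - j := by
      have := congrArg List.length htl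
      simpa using this
    by_cases hnil : k.toList = []
    · refine ⟨0, ⟨le_refl 0, by simp [hnil]⟩, ?_⟩
      apply String.toList_inj.mp
      rw [PySem.Str.toList_slice, PySem.Chars.slice_eq_listSlice, hnil]
      rw [PySem.List.slice_toNat _ (le_refl 0) (by omega)]
      simp
    · have hj : j < (PySem.Str.lower text).toList.length := by
        rcases List.exists_cons_of_ne_nil hnil with ⟨c, cs, hc⟩
        by_contra hge
        rw [List.drop_eq_nil_of_le (by omega)] at htl
        rw [hc] at htl; simp at htl
      refine ⟨(j : Int), ⟨by omega, by omega⟩, ?_⟩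
      apply String.toList_inj.mp
      rw [PySem.Str.toList_slice, PySem.Chars.slice_eq_listSlice,
        PySem.List.slice_toNat _ (by omega) (by omega)]
      have htoNat : ((j : Int) + (k.toList.length : Int)).toNat - ((j : Int)).toNat
          = k.toList.length := by omega
      simp only [Int.toNat_natCast] at htoNat ⊢
      rw [htoNat, ← htl, List.take_left]

theorem toxicity_hits_spec : Claim_equal_toxicity_hits := by
  intro text keywords _
  unfold Spec_toxicity_hits toxicity_hits toxicity_hits_alt
  simp only []
  rw [PySem.List.foldl_count_if, PySem.List.sum_map_const_int,
    ← List.countP_eq_length_filter, mul_one, zero_add]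
  congr 1
  exact List.countP_congr (fun k hk => by rw [subs_contains_iff text keywords k hk])
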